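-- pv_equiv track=rewrite | github.com/parallelworks/mexdex | data_IO.py | get_index_in_str_list
-- ===== SOURCE A (Python) =====
-- def get_index_in_str_list(str_list, flag_str, match_first=True, start_from=0):
--     line_num = None
--     for i, line in enumerate(str_list[start_from:], start_from):
--         if flag_str in line:
--             line_num = i
--             if match_first:
--                 return line_num
--     return line_num
-- ===== SOURCE B (Python) =====
-- def get_index_in_str_list(str_list, flag_str, match_first=True, start_from=0):
--     idxs = [i for i, line in enumerate(str_list[start_from:], start_from) if flag_str in line]
--     if not idxs:
--         return None
--     return idxs[0] if match_first else idxs[-1]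
-- ===== Notes on version B (the rewrite author's own statement) =====
-- stated objective: simpler
-- what changed: Replaced the short-circuiting loop with a mutable last-match accumulator by a single comprehension collecting all matching indices followed by an endpoint selection (first or last element).
import Mathlib
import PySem

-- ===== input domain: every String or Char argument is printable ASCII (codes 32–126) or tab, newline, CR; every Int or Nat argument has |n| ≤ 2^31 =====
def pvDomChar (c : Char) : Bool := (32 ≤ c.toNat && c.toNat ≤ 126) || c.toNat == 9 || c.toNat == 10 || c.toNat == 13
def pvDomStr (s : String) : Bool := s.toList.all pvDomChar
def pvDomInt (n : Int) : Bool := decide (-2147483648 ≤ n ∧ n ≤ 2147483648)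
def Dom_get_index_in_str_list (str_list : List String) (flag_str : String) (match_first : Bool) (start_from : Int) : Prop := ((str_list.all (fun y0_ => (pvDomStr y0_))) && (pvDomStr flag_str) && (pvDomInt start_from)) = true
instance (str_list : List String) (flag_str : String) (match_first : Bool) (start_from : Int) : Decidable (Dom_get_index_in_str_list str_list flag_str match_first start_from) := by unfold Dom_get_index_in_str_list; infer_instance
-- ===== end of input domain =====

-- B replaces A's short-circuiting loop with a collect-all-matching-indices pass and an
-- endpoint selection (first or last); objective: simpler.

-- ===== PORT A =====
-- A's for-loop with early return: structural recursion over the enumerated slice,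
-- carrying the mutable `line_num` accumulator.
def pvGoA (flag_str : String) (match_first : Bool) : List (Int × String) → Option Int → Option Int
  | [], acc => acc
  | (i, line) :: rest, acc =>
    if PySem.Str.isIn flag_str line then
      if match_first then some i
      else pvGoA flag_str match_first rest (some i)
    else pvGoA flag_str match_first rest acc

def get_index_in_str_list (str_list : List String) (flag_str : String) (match_first : Bool) (start_from : Int) : Option Int :=
  pvGoA flag_str match_first
    (PySem.List.enumerate (PySem.List.slice str_list (some start_from) none) start_from) none

-- ===== PORT B =====
def get_index_in_str_list_alt (str_list : List String) (flag_str : String) (match_first : Bool) (start_from : Int) : Option Int :=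
  let idxs := ((PySem.List.enumerate (PySem.List.slice str_list (some start_from) none) start_from).filter
      (fun p => PySem.Str.isIn flag_str p.2)).map (·.1)
  if idxs.isEmpty then none
  else if match_first then idxs.head? else idxs.getLast?

-- ===== PRECONDITION & SPEC =====
def Spec_get_index_in_str_list (str_list : List String) (flag_str : String) (match_first : Bool) (start_from : Int) (out : Option Int) : Prop := out = get_index_in_str_list_alt str_list flag_str match_first start_from
instance (str_list : List String) (flag_str : String) (match_first : Bool) (start_from : Int) (out : Option Int) : Decidable (Spec_get_index_in_str_list str_list flag_str match_first start_from out) := by unfold Spec_get_index_in_str_list; infer_instance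

-- ===== CLAIM (what is proved, stated in full; the proofs are below) =====
def Claim_equal_get_index_in_str_list : Prop := ∀ (str_list : List String) (flag_str : String) (match_first : Bool) (start_from : Int), Dom_get_index_in_str_list str_list flag_str match_first start_from → Spec_get_index_in_str_list str_list flag_str match_first start_from (get_index_in_str_list str_list flag_str match_first start_from)

-- ===== LEMMAS AND PROOFS =====

-- A's accumulator loop equals "collect then select" over any enumerated list.
theorem pvGoA_eq (flag_str : String) (match_first : Bool) :
    ∀ (L : List (Int × String)) (acc : Option Int),
      pvGoA flag_str match_first L acc =
        (let idxs := (L.filter (fun p => PySem.Str.isIn flag_str p.2)).map (·.1)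
         if idxs.isEmpty then acc
         else if match_first then idxs.head? else idxs.getLast?) := by
  intro L
  induction L with
  | nil => intro acc; simp [pvGoA]
  | cons hd tl ih =>
    intro acc
    obtain ⟨i, line⟩ := hd
    simp only [pvGoA]
    by_cases h : PySem.Str.isIn flag_str line = true
    · rw [if_pos h, List.filter_cons_of_pos (by exact h), List.map_cons]
      simp only [List.isEmpty_cons, Bool.false_eq_true, if_false]
      cases match_first with
      | true => simp
      | false =>
        simp only [Bool.false_eq_true, if_false]
        rw [ih (some i)]
        simp only [Bool.false_eq_true, if_false]
        cases hcase : (tl.filter (fun p => PySem.Str.isIn flag_str p.2)).map (fun x => x.1) with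
        | nil => simp
        | cons a l => simp [List.getLast?_cons_cons]
    · rw [if_neg h, ih acc, List.filter_cons_of_neg (by exact h)]

-- ===== VERDICT (by name: the statement is the Claim_ definition above) =====
theorem get_index_in_str_list_spec : Claim_equal_get_index_in_str_list := by
  intro str_list flag_str match_first start_from _
  unfold Spec_get_index_in_str_list get_index_in_str_list get_index_in_str_list_alt
  rw [pvGoA_eq]
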